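-- pv_equiv track=rewrite | github.com/victorposada/wanna-see-a-magic-trick | main.py | order_columns
-- ===== SOURCE A (Python) =====
-- def order_columns (correct_column, data):
--     keys = list(data.keys())
--     correct_index = keys.index(correct_column)
--     middle_index = len(keys) // 2
--     keys.pop(correct_index)
--     keys.insert(middle_index, correct_column)
--     ordered_data = {key: data[key] for key in keys}
--     return ordered_data
-- ===== SOURCE B (Python) =====
-- def order_columns(correct_column, data):
--     middle = len(data) // 2
--     others = [k for k in data if k != correct_column]
--     ordered = others[:middle] + [correct_column] + others[middle:]
--     return {k: data[k] for k in ordered}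
-- ===== Notes on version B (the rewrite author's own statement) =====
-- stated objective: simpler
-- what changed: B derives the key order by filtering out the correct column and splicing it back with slice concatenation others[:middle]+[correct_column]+others[middle:], instead of A's index/pop/insert mutation of the key list.
import Mathlib
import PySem

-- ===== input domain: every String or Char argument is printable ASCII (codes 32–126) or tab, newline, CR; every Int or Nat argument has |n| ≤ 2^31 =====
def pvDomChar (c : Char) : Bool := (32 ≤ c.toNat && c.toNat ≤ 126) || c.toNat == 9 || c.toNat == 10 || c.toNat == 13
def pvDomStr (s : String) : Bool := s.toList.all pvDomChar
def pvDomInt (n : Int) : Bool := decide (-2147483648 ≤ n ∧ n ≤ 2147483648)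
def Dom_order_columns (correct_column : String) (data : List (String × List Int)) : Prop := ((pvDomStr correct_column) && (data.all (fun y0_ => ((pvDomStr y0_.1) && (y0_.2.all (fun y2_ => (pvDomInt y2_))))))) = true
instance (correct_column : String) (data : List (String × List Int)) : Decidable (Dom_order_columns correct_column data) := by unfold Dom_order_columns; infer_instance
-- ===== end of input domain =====

-- B replaces A's index/pop/insert mutation of the key list by filtering the correct
-- column out and splicing it back with slice concatenation (objective: simpler).

-- ===== PORT A =====
def order_columns (correct_column : String) (data : List (String × List Int)) : List (String × List Int) :=
  let d := PySem.Dict.ofList data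
  let keys := d.keys
  match PySem.List.index? keys correct_column with
  | none => []      -- keys.index raises ValueError here; excluded by Pre_
  | some correct_index =>
    let middle_index : Nat := keys.length / 2
    match PySem.List.pop? keys (correct_index : Int) with
    | none => []    -- unreachable: correct_index is a valid position
    | some r =>
      let keys2 := PySem.List.insert r.2 (middle_index : Int) correct_column
      (keys2.foldl (fun od k => od.insert k (d.getD k [])) PySem.Dict.empty).items

-- ===== PORT B =====
def order_columns_alt (correct_column : String) (data : List (String × List Int)) : List (String × List Int) :=
  let d := PySem.Dict.ofList data
  let middle : Nat := d.size / 2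
  let others := d.keys.filter (fun k => k != correct_column)
  let ordered := PySem.List.slice others none (some (middle : Int)) ++ [correct_column]
                   ++ PySem.List.slice others (some (middle : Int)) none
  (ordered.foldl (fun od k => od.insert k (d.getD k [])) PySem.Dict.empty).items

-- ===== PRECONDITION & SPEC =====
-- Pre_ excludes exactly the inputs where correct_column is not a key of data:
-- there A raises ValueError (keys.index) and B raises KeyError (data[correct_column]).
def Pre_order_columns (correct_column : String) (data : List (String × List Int)) : Prop :=
  correct_column ∈ data.map Prod.fst
instance (correct_column : String) (data : List (String × List Int)) : Decidable (Pre_order_columns correct_column data) := by unfold Pre_order_columns; infer_instance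

def pvWitness_order_columns : String × (List (String × List Int)) := ("b", [("a", [1]), ("b", [2]), ("c", [3])])

def Spec_order_columns (correct_column : String) (data : List (String × List Int)) (out : List (String × List Int)) : Prop := out = order_columns_alt correct_column data
instance (correct_column : String) (data : List (String × List Int)) (out : List (String × List Int)) : Decidable (Spec_order_columns correct_column data out) := by unfold Spec_order_columns; infer_instance

-- ===== CLAIM (what is proved, stated in full; the proofs are below) =====
def Claim_equal_order_columns : Prop := ∀ (correct_column : String) (data : List (String × List Int)), Dom_order_columns correct_column data → Pre_order_columns correct_column data → Spec_order_columns correct_column data (order_columns correct_column data)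

-- ===== LEMMAS AND PROOFS =====

lemma keys_ofList_eq (l : List (String × List Int)) :
    (PySem.Dict.ofList l).keys = PySem.Set.ofList (l.map Prod.fst) := by
  have h := PySem.Dict.keys_foldl_insert_key (ν := List Int) l Prod.fst (fun _ p => p.2) PySem.Dict.empty
  simpa [PySem.Dict.ofList, PySem.Dict.update, PySem.Dict.keys_empty, PySem.Set.update_nil_left] using h

lemma idxOf?_of_mem (l : List String) (c : String) (h : c ∈ l) :
    List.idxOf? c l = some (l.idxOf c) := by
  cases hq : List.idxOf? c l with
  | none => exact absurd h (List.idxOf?_eq_none_iff.mp hq)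
  | some i => rw [List.idxOf_eq_getD_idxOf?, hq]; rfl

-- ===== VERDICT (by name: the statement is the Claim_ definition above) =====
theorem order_columns_spec : Claim_equal_order_columns := by
  intro c data _ hpre
  unfold Spec_order_columns
  unfold Pre_order_columns at hpre
  unfold order_columns order_columns_alt
  set d := PySem.Dict.ofList data with hd
  have hkeys : d.keys = PySem.Set.ofList (data.map Prod.fst) := keys_ofList_eq data
  have hmem : c ∈ d.keys := by rw [hkeys]; exact (PySem.Set.mem_ofList _ _).mpr hpre
  have hnodup : d.keys.Nodup := by rw [hkeys]; exact PySem.Set.nodup_ofList _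
  have hlen : 0 < d.keys.length := List.length_pos_of_mem hmem
  -- the index? step
  have hidx : PySem.List.index? d.keys c = some (d.keys.idxOf c) := by
    rw [PySem.List.index?_eq_idxOf?]; exact idxOf?_of_mem _ _ hmem
  have hlt : d.keys.idxOf c < d.keys.length := List.idxOf_lt_length_of_mem hmem
  -- the pop step
  have hpop : PySem.List.pop? d.keys ((d.keys.idxOf c : Nat) : Int)
      = some (d.keys[d.keys.idxOf c], d.keys.eraseIdx (d.keys.idxOf c)) :=
    PySem.List.pop?_natCast _ _ hlt
  -- eraseIdx at idxOf = erase = filter (on a nodup list)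
  have herase : d.keys.eraseIdx (d.keys.idxOf c) = d.keys.filter (fun k => k != c) := by
    rw [← hnodup.erase_eq_filter c, List.erase_eq_eraseIdx, idxOf?_of_mem _ _ hmem]
  have hlenerase : (d.keys.filter (fun k => k != c)).length = d.keys.length - 1 := by
    have he2 : d.keys.eraseIdx (List.idxOf c d.keys) = d.keys.erase c := by
      rw [herase, ← hnodup.erase_eq_filter]
    rw [← herase, he2]
    exact List.length_erase_of_mem hmem
  -- the insert step vs slice concatenation
  have hmid : d.keys.length / 2 ≤ (d.keys.filter (fun k => k != c)).length := by
    rw [hlenerase]; omega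
  have hsize : d.size = d.keys.length := by
    simp only [PySem.Dict.size, PySem.Dict.keys, List.length_map]
  simp only [hidx, hpop, hsize, herase,
    PySem.List.insert_natCast _ _ _ hmid,
    PySem.List.slice_to_natCast, PySem.List.slice_from_natCast,
    List.append_assoc, List.singleton_append]
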